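-- pv_equiv track=rewrite | github.com/Mokhtar2121/Premier_league_Setting_Up_the_sql_database | ddgb.py | addressdivider
-- ===== SOURCE A (Python) =====
-- def addressdivider(Faddress):
--     countComa = 0
--     city = ""
--     street = ""
--     for i in Faddress:
--         if i == ',': countComa += 1
--         if (countComa == 2): city += i
--         if (countComa < 2): street += i
--     return (city, street)
-- ===== SOURCE B (Python) =====
-- def addressdivider(Faddress):
--     head, sep1, tail = Faddress.partition(',')
--     mid, sep2, rest = tail.partition(',')
--     if not sep2:
--         return ("", Faddress)
--     city_body, _sep3, _tail3 = rest.partition(',')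
--     return ("," + city_body, head + sep1 + mid)
-- ===== Notes on version B (the rewrite author's own statement) =====
-- stated objective: simpler
-- what changed: Replaced the char-by-char loop with a running comma counter by three str.partition(',') calls that cut the string into segments up front and reassemble city/street from them.
import Mathlib
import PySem

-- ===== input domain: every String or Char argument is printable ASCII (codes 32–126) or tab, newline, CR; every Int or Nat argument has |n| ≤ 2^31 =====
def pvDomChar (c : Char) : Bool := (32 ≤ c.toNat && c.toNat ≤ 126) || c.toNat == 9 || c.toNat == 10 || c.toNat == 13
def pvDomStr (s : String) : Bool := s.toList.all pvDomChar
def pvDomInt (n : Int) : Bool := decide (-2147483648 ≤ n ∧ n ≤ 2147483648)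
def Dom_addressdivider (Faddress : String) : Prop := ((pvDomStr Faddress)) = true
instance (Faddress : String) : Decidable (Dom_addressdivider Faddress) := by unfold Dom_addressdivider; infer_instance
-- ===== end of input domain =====

-- B replaces A's char-by-char counting loop by three partition-at-comma cuts; objective: simpler.

-- ===== PORT A =====
-- loop body of A; strings are handled as List Char (city += i / street += i are list appends)
def addressdividerStep (s : Int × List Char × List Char) (i : Char) : Int × List Char × List Char :=
  let countComa : Int := if i = ',' then s.1 + 1 else s.1
  (countComa,
   if countComa = 2 then s.2.1 ++ [i] else s.2.1,
   if countComa < 2 then s.2.2 ++ [i] else s.2.2)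

def addressdivider (Faddress : String) : String × String :=
  let r := Faddress.toList.foldl addressdividerStep (0, [], [])
  (String.ofList r.2.1, String.ofList r.2.2)

-- ===== PORT B =====
def pvNotComma (c : Char) : Bool := c ≠ ','

-- hand port of Python's str.partition(',') on List Char: exact for the one-char separator ','
def pyPartitionComma (s : List Char) : List Char × List Char × List Char :=
  match s.span pvNotComma with
  | (a, []) => (a, [], [])
  | (a, x :: r) => (a, [x], r)

def addressdivider_alt (Faddress : String) : String × String :=
  let p1 := pyPartitionComma Faddress.toList          -- head, sep1, tail
  let p2 := pyPartitionComma p1.2.2                   -- mid, sep2, rest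
  if p2.2.1.isEmpty then ("", Faddress)
  else
    let p3 := pyPartitionComma p2.2.2                 -- city_body, _sep3, _tail3
    (String.ofList (',' :: p3.1), String.ofList (p1.1 ++ p1.2.1 ++ p2.1))

-- ===== PRECONDITION & SPEC =====
def Spec_addressdivider (Faddress : String) (out : String × String) : Prop := out = addressdivider_alt Faddress
instance (Faddress : String) (out : String × String) : Decidable (Spec_addressdivider Faddress out) := by unfold Spec_addressdivider; infer_instance

-- ===== CLAIM (what is proved, stated in full; the proofs are below) =====
def Claim_equal_addressdivider : Prop := ∀ (Faddress : String), Dom_addressdivider Faddress → Spec_addressdivider Faddress (addressdivider Faddress)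

-- ===== LEMMAS AND PROOFS =====

theorem pvNotComma_comma : pvNotComma ',' = false := by decide

theorem pvNotComma_of_ne {x : Char} (hx : ¬ x = ',') : pvNotComma x = true := by
  simp [pvNotComma, hx]

theorem step_comma (c : Int) (ci st : List Char) :
    addressdividerStep (c, ci, st) ',' =
      (c + 1, if c + 1 = 2 then ci ++ [','] else ci, if c + 1 < 2 then st ++ [','] else st) := by
  simp [addressdividerStep]

theorem step_other (c : Int) (ci st : List Char) {x : Char} (hx : ¬ x = ',') :
    addressdividerStep (c, ci, st) x =
      (c, if c = 2 then ci ++ [x] else ci, if c < 2 then st ++ [x] else st) := by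
  simp [addressdividerStep, hx]

-- once the counter is ≥ 3, neither city nor street changes any more
theorem foldl_step_hi (cs : List Char) : ∀ (c : Int) (ci st : List Char), 3 ≤ c →
    (cs.foldl addressdividerStep (c, ci, st)).2 = (ci, st) := by
  induction cs with
  | nil => intro c ci st _; rfl
  | cons x xs ih =>
    intro c ci st hc
    by_cases hx : x = ','
    · subst hx
      rw [List.foldl_cons, step_comma, if_neg (by omega), if_neg (by omega)]
      exact ih _ _ _ (by omega)
    · rw [List.foldl_cons, step_other c ci st hx, if_neg (by omega), if_neg (by omega)]
      exact ih _ _ _ hc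

-- with the counter at 2, city collects chars up to (excluding) the next comma
theorem foldl_step_two (cs : List Char) : ∀ (ci st : List Char),
    (cs.foldl addressdividerStep (2, ci, st)).2 = (ci ++ cs.takeWhile pvNotComma, st) := by
  induction cs with
  | nil => intro ci st; simp
  | cons x xs ih =>
    intro ci st
    by_cases hx : x = ','
    · subst hx
      rw [List.foldl_cons, step_comma, if_neg (by omega), if_neg (by omega)]
      rw [foldl_step_hi xs (2 + 1) ci st (by omega)]
      simp [pvNotComma_comma]
    · rw [List.foldl_cons, step_other 2 ci st hx, if_pos rfl, if_neg (by omega), ih]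
      simp [pvNotComma_of_ne hx]

-- with the counter at 1, street collects up to the next comma (excluded), then city takes over
theorem foldl_step_one (cs : List Char) : ∀ (ci st : List Char),
    (cs.foldl addressdividerStep (1, ci, st)).2 =
      match cs.span pvNotComma with
      | (a, []) => (ci, st ++ a)
      | (a, _ :: r) => (ci ++ ',' :: r.takeWhile pvNotComma, st ++ a) := by
  induction cs with
  | nil => intro ci st; simp
  | cons x xs ih =>
    intro ci st
    by_cases hx : x = ','
    · subst hx
      rw [List.foldl_cons, step_comma, if_pos (by omega), if_neg (by omega)]
      norm_num
      rw [foldl_step_two xs (ci ++ [',']) st]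
      simp [pvNotComma_comma]
    · rw [List.foldl_cons, step_other 1 ci st hx, if_neg (by omega), if_pos (by omega), ih]
      have hpx := pvNotComma_of_ne hx
      simp only [List.span_eq_takeWhile_dropWhile, List.takeWhile_cons, List.dropWhile_cons, hpx]
      cases h : xs.dropWhile pvNotComma with
      | nil => simp
      | cons y r => simp

-- with the counter at 0, street collects through the first comma, then the counter is 1
theorem foldl_step_zero (cs : List Char) : ∀ (ci st : List Char),
    (cs.foldl addressdividerStep (0, ci, st)).2 =
      match cs.span pvNotComma with
      | (a, []) => (ci, st ++ a)
      | (a, _ :: r) => (r.foldl addressdividerStep (1, ci, st ++ a ++ [','])).2 := by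
  induction cs with
  | nil => intro ci st; simp
  | cons x xs ih =>
    intro ci st
    by_cases hx : x = ','
    · subst hx
      rw [List.foldl_cons, step_comma, if_neg (by omega), if_pos (by omega)]
      simp [pvNotComma_comma]
    · rw [List.foldl_cons, step_other 0 ci st hx, if_neg (by omega), if_pos (by omega), ih]
      have hpx := pvNotComma_of_ne hx
      simp only [List.span_eq_takeWhile_dropWhile, List.takeWhile_cons, List.dropWhile_cons, hpx]
      cases h : xs.dropWhile pvNotComma with
      | nil => simp
      | cons y r => simp

-- the head of a nonempty dropWhile fails the predicate (here: is the comma)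
theorem dropWhile_head_comma (cs : List Char) : ∀ (x : Char) (r : List Char),
    cs.dropWhile pvNotComma = x :: r → x = ',' := by
  induction cs with
  | nil => intro x r h; simp at h
  | cons y ys ih =>
    intro x r h
    cases hpy : pvNotComma y with
    | false =>
      rw [List.dropWhile_cons, hpy] at h
      injection h with h1 _
      subst h1
      simpa [pvNotComma] using hpy
    | true =>
      rw [List.dropWhile_cons, hpy] at h
      exact ih x r (by simpa using h)

-- pyPartitionComma in takeWhile/dropWhile form
theorem partition_eq (cs : List Char) :
    pyPartitionComma cs =
      match cs.dropWhile pvNotComma with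
      | [] => (cs.takeWhile pvNotComma, [], [])
      | x :: r => (cs.takeWhile pvNotComma, [x], r) := by
  unfold pyPartitionComma
  rw [List.span_eq_takeWhile_dropWhile]
  cases cs.dropWhile pvNotComma <;> rfl

-- if there is no comma, takeWhile is everything
theorem takeWhile_all (cs : List Char) (h : cs.dropWhile pvNotComma = []) :
    cs.takeWhile pvNotComma = cs := by
  conv_rhs => rw [← List.takeWhile_append_dropWhile (p := pvNotComma) (l := cs)]
  rw [h, List.append_nil]

-- the first component of a partition is always the takeWhile prefix
theorem partition_fst (cs : List Char) : (pyPartitionComma cs).1 = cs.takeWhile pvNotComma := by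
  rw [partition_eq]
  cases cs.dropWhile pvNotComma <;> rfl

theorem partition_nil : pyPartitionComma ([] : List Char) = ([], [], []) := rfl

-- corollaries of the loop lemmas with the comma-split shape made explicit
theorem foldl_step_zero_nil (cs : List Char) (ci st : List Char)
    (h : cs.dropWhile pvNotComma = []) :
    (cs.foldl addressdividerStep (0, ci, st)).2 = (ci, st ++ cs.takeWhile pvNotComma) := by
  rw [foldl_step_zero, List.span_eq_takeWhile_dropWhile, h]

theorem foldl_step_zero_cons (cs : List Char) (x : Char) (r : List Char) (ci st : List Char)
    (h : cs.dropWhile pvNotComma = x :: r) :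
    (cs.foldl addressdividerStep (0, ci, st)).2 =
      (r.foldl addressdividerStep (1, ci, st ++ cs.takeWhile pvNotComma ++ [','])).2 := by
  rw [foldl_step_zero, List.span_eq_takeWhile_dropWhile, h]

theorem foldl_step_one_nil (cs : List Char) (ci st : List Char)
    (h : cs.dropWhile pvNotComma = []) :
    (cs.foldl addressdividerStep (1, ci, st)).2 = (ci, st ++ cs.takeWhile pvNotComma) := by
  rw [foldl_step_one, List.span_eq_takeWhile_dropWhile, h]

theorem foldl_step_one_cons (cs : List Char) (x : Char) (r : List Char) (ci st : List Char)
    (h : cs.dropWhile pvNotComma = x :: r) :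
    (cs.foldl addressdividerStep (1, ci, st)).2 =
      (ci ++ ',' :: r.takeWhile pvNotComma, st ++ cs.takeWhile pvNotComma) := by
  rw [foldl_step_one, List.span_eq_takeWhile_dropWhile, h]

-- ===== VERDICT (by name: the statement is the Claim_ definition above) =====
theorem addressdivider_spec : Claim_equal_addressdivider := by
  intro F _
  unfold Spec_addressdivider
  simp only [addressdivider, addressdivider_alt]
  cases h1 : F.toList.dropWhile pvNotComma with
  | nil =>
    have hp1 : pyPartitionComma F.toList = (F.toList.takeWhile pvNotComma, [], []) := by
      rw [partition_eq, h1]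
    rw [foldl_step_zero_nil _ _ _ h1, hp1, partition_nil]
    simp [takeWhile_all F.toList h1]
  | cons x r =>
    have hx : x = ',' := dropWhile_head_comma _ _ _ h1
    have hp1 : pyPartitionComma F.toList = (F.toList.takeWhile pvNotComma, [x], r) := by
      rw [partition_eq, h1]
    rw [foldl_step_zero_cons _ _ _ _ _ h1, hp1]
    cases h2 : r.dropWhile pvNotComma with
    | nil =>
      have hp2 : pyPartitionComma r = (r.takeWhile pvNotComma, [], []) := by
        rw [partition_eq, h2]
      have hF : F.toList.takeWhile pvNotComma ++ [','] ++ r = F.toList := by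
        conv_rhs => rw [← List.takeWhile_append_dropWhile (p := pvNotComma) (l := F.toList)]
        rw [h1, hx]
        simp
      rw [foldl_step_one_nil _ _ _ h2, hp2, partition_nil, takeWhile_all r h2]
      simp only [List.nil_append]
      rw [hF]
      simp
    | cons y r2 =>
      have hp2 : pyPartitionComma r = (r.takeWhile pvNotComma, [y], r2) := by
        rw [partition_eq, h2]
      rw [foldl_step_one_cons _ _ _ _ _ h2, hp2]
      simp [partition_fst, hx]
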